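-- pv_equiv track=rewrite | github.com/thiagopelizoni/MathChallenges | src/problem_156.py | roots
-- ===== SOURCE A (Python) =====
-- def count_digit(n, d):
--     if n <= 0:
--         return 0
--
--     total = 0
--     p = 1
--     while p <= n:
--         high = n // (10 * p)
--         cur = (n // p) % 10
--         low = n % p
--
--         if cur > d:
--             total += (high + 1) * p
--         elif cur == d:
--             total += high * p + low + 1
--         else:
--             total += high * p
--         p *= 10
--
--     return total
--
-- def roots(d):
--     ans = []
--     stack = [(0, 10**12)]
--
--     while stack:
--         lo, hi = stack.pop()
--         if count_digit(hi, d) < lo or count_digit(lo, d) > hi: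
--             continue
--
--         if lo == hi:
--             if count_digit(lo, d) == lo:
--                 ans.append(lo)
--             continue
--
--         step = (hi - lo + 10) // 10
--         for start in range(lo, hi + 1, step):
--             stack.append((start, min(hi, start + step - 1)))
--
--     return ans
-- ===== SOURCE B (Python) =====
-- def count_digit(n, d):
--     if n <= 0:
--         return 0
--
--     total = 0
--     p = 1
--     while p <= n:
--         high = n // (10 * p)
--         cur = (n // p) % 10
--         low = n % p
--
--         if cur > d:
--             total += (high + 1) * p
--         elif cur == d:
--             total += high * p + low + 1
--         else:
--             total += high * p
--         p *= 10
--
--     return total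
--
-- def roots(d):
--     out = []
--
--     def go(lo, hi):
--         if count_digit(hi, d) < lo or count_digit(lo, d) > hi:
--             return
--         if lo == hi:
--             if count_digit(lo, d) == lo:
--                 out.append(lo)
--             return
--         mid = (lo + hi) // 2
--         go(lo, mid)
--         go(mid + 1, hi)
--
--     go(0, 10**12)
--     out.reverse()
--     return out
-- ===== Notes on version B (the rewrite author's own statement) =====
-- stated objective: alternative
-- what changed: Replaces A's explicit LIFO stack with decimal-step splitting by a recursive binary bisection at the interval midpoint that collects the fixed points in ascending order and reverses the list at the end.
import Mathlib
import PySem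

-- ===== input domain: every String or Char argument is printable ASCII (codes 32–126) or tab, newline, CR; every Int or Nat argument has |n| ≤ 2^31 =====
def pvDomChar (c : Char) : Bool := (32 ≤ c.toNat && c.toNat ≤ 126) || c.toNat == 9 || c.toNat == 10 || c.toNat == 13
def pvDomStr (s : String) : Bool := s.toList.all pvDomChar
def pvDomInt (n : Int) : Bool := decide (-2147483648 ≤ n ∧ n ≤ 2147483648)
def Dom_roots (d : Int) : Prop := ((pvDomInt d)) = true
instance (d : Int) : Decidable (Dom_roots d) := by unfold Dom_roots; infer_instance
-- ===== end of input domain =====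

-- B replaces A's explicit stack with decimal 10-way splitting by a recursive binary bisection collecting ascending and reversing at the end; same cost (objective: alternative).

-- ===== PORT A =====
-- count_digit's while loop: p = 1, 10, 100, …; the Nat argument is a totality fuel
-- (64 iterations reach p > 10^63, far beyond every n this program feeds in).
def cdLoop : Nat → Int → Int → Int → Int → Int
  | 0, _, _, _, total => total
  | fuel+1, n, d, p, total =>
    if p ≤ n then
      let high := PySem.Int.floordiv n (10 * p)
      let cur := PySem.Int.mod (PySem.Int.floordiv n p) 10
      let low := PySem.Int.mod n p
      let total' :=
        if cur > d then total + (high + 1) * p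
        else if cur = d then total + high * p + low + 1
        else total + high * p
      cdLoop fuel n d (p * 10) total'
    else total

def count_digit (n d : Int) : Int :=
  if n ≤ 0 then 0 else cdLoop 64 n d 1 0

-- A's while-stack loop.  The stack is kept pop-end-first (Python's stack.pop() takes the
-- head here, and the children appended by the for-loop arrive reversed in front), which is
-- the same mutable list read from the other end.  The Nat argument is a totality fuel of
-- 3*10^12, one unit per pop; the proof below (pvLoopA_spec) shows the loop always ends
-- with fuel to spare, so the port is exact.
def loopA : Nat → Int → List (Int × Int) → List Int → List Int
  | 0, _, _, ans => ans
  | _+1, _, [], ans => ans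
  | fuel+1, d, (lo, hi) :: stack, ans =>
    if count_digit hi d < lo ∨ count_digit lo d > hi then loopA fuel d stack ans
    else if lo = hi then
      loopA fuel d stack (if count_digit lo d = lo then ans ++ [lo] else ans)
    else
      let step := PySem.Int.floordiv (hi - lo + 10) 10
      let children := (PySem.List.pyRange lo (hi + 1) step).map
        (fun start => (start, min hi (start + step - 1)))
      loopA fuel d (children.reverse ++ stack) ans

def roots (d : Int) : List Int := loopA 3000000000000 d [(0, 1000000000000)] []

-- ===== PORT B =====
-- B's recursive bisection go(lo, hi); passing the accumulator is the functional form of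
-- appending to `out`.  The Nat argument is a recursion-depth fuel: the interval halves
-- each level, so depth 41 is never exhausted from width 10^12 (10^12 + 2 ≤ 2^41; proved
-- below inside goB_spec, which shows the fuel never runs out on the claimed call).
def goB : Nat → Int → Int → Int → List Int → List Int
  | 0, _, _, _, out => out
  | fuel+1, d, lo, hi, out =>
    if count_digit hi d < lo ∨ count_digit lo d > hi then out
    else if lo = hi then (if count_digit lo d = lo then out ++ [lo] else out)
    else
      let mid := PySem.Int.floordiv (lo + hi) 2
      goB fuel d (mid + 1) hi (goB fuel d lo mid out)

def roots_alt (d : Int) : List Int := (goB 41 d 0 1000000000000 []).reverse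

-- ===== PRECONDITION & SPEC =====
def Spec_roots (d : Int) (out : List Int) : Prop := out = roots_alt d
instance (d : Int) (out : List Int) : Decidable (Spec_roots d out) := by unfold Spec_roots; infer_instance

-- ===== CLAIM (what is proved, stated in full; the proofs are below) =====
def Claim_equal_roots : Prop := ∀ (d : Int), Dom_roots d → Spec_roots d (roots d)

-- ===== LEMMAS AND PROOFS =====

-- the contribution of one digit position p to count_digit (the loop body's increment)
def pvT (n d p : Int) : Int :=
  let high := PySem.Int.floordiv n (10 * p)
  let cur := PySem.Int.mod (PySem.Int.floordiv n p) 10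
  let low := PySem.Int.mod n p
  if cur > d then (high + 1) * p else if cur = d then high * p + low + 1 else high * p

theorem cdLoop_step (f : Nat) (n d p t : Int) :
    cdLoop (f + 1) n d p t = if p ≤ n then cdLoop f n d (p * 10) (t + pvT n d p) else t := by
  simp only [cdLoop, pvT]
  by_cases h : p ≤ n
  · rw [if_pos h, if_pos h]
    congr 1
    split_ifs <;> ring
  · rw [if_neg h, if_neg h]

theorem pvT_eq (n d p : Int) (hp : 0 < p) :
    pvT n d p =
      if (n / p) % 10 > d then (n / (10 * p) + 1) * p
      else if (n / p) % 10 = d then (n / (10 * p)) * p + n % p + 1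
      else (n / (10 * p)) * p := by
  simp only [pvT, PySem.Int.floordiv_eq_ediv_of_pos hp,
    PySem.Int.floordiv_eq_ediv_of_pos (show (0:Int) < 10 * p by omega),
    PySem.Int.mod_eq_emod_of_pos hp,
    PySem.Int.mod_eq_emod_of_pos (show (0:Int) < 10 by norm_num)]

theorem pvT_nonneg (n d p : Int) (hp : 0 < p) (hn : 0 ≤ n) : 0 ≤ pvT n d p := by
  rw [pvT_eq n d p hp]
  have ha : 0 ≤ n / (10 * p) := Int.ediv_nonneg hn (by omega)
  have hr : 0 ≤ n % p := Int.emod_nonneg n (by omega)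
  have hap : 0 ≤ n / (10 * p) * p := mul_nonneg ha hp.le
  have hap1 : 0 ≤ (n / (10 * p) + 1) * p := mul_nonneg (by omega) hp.le
  split_ifs <;> linarith

theorem pvT_mono (n m d p : Int) (hp : 0 < p) (hnm : n ≤ m) :
    pvT n d p ≤ pvT m d p := by
  rw [pvT_eq n d p hp, pvT_eq m d p hp]
  have ha : n / (10 * p) = n / p / 10 := by
    rw [mul_comm]; exact (Int.ediv_ediv_of_nonneg hp.le).symm
  have ha' : m / (10 * p) = m / p / 10 := by
    rw [mul_comm]; exact (Int.ediv_ediv_of_nonneg hp.le).symm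
  have hqq' : n / p ≤ m / p := Int.ediv_le_ediv hp hnm
  have hq : p * (n / p) + n % p = n := Int.mul_ediv_add_emod n p
  have hq' : p * (m / p) + m % p = m := Int.mul_ediv_add_emod m p
  have hrn : 0 ≤ n % p := Int.emod_nonneg n (by omega)
  have hrn' : n % p < p := Int.emod_lt_of_pos n hp
  have hrm : 0 ≤ m % p := Int.emod_nonneg m (by omega)
  have hrm' : m % p < p := Int.emod_lt_of_pos m hp
  have haa' : n / (10 * p) ≤ m / (10 * p) := by
    rw [ha, ha']; exact Int.ediv_le_ediv (by norm_num) hqq'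
  have hdec : n / p = 10 * (n / p / 10) + (n / p) % 10 ∧ 0 ≤ (n / p) % 10 ∧ (n / p) % 10 < 10 := by
    omega
  have hdec' : m / p = 10 * (m / p / 10) + (m / p) % 10 ∧ 0 ≤ (m / p) % 10 ∧ (m / p) % 10 < 10 := by
    omega
  have hexp : ∀ x : Int, (x + 1) * p = x * p + p := fun x => by ring
  by_cases hA : n / (10 * p) + 1 ≤ m / (10 * p)
  · have h1 : (n / (10 * p) + 1) * p ≤ m / (10 * p) * p :=
      mul_le_mul_of_nonneg_right hA hp.le
    have hub : (if (n / p) % 10 > d then (n / (10 * p) + 1) * p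
        else if (n / p) % 10 = d then (n / (10 * p)) * p + n % p + 1
        else (n / (10 * p)) * p) ≤ (n / (10 * p) + 1) * p := by
      split_ifs <;> linarith [hexp (n / (10 * p))]
    have hlb : m / (10 * p) * p ≤ (if (m / p) % 10 > d then (m / (10 * p) + 1) * p
        else if (m / p) % 10 = d then (m / (10 * p)) * p + m % p + 1
        else (m / (10 * p)) * p) := by
      split_ifs <;> linarith [hexp (m / (10 * p))]
    linarith
  · have haeq : n / (10 * p) = m / (10 * p) := by omega
    have hcc' : (n / p) % 10 ≤ (m / p) % 10 := by omega
    have haeqp : n / (10 * p) * p = m / (10 * p) * p := by rw [haeq]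
    have hexpn := hexp (n / (10 * p))
    have hexpm := hexp (m / (10 * p))
    by_cases h1 : (n / p) % 10 > d
    · have h1' : (m / p) % 10 > d := by omega
      rw [if_pos h1, if_pos h1', haeq]
    · rw [if_neg h1]
      by_cases h2 : (n / p) % 10 = d
      · rw [if_pos h2]
        by_cases h3 : (m / p) % 10 > d
        · rw [if_pos h3]; linarith
        · have h4 : (m / p) % 10 = d := by omega
          rw [if_neg h3, if_pos h4]
          have hqeq : n / p = m / p := by omega
          have hpp : p * (n / p) = p * (m / p) := by rw [hqeq]
          linarith
      · rw [if_neg h2]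
        by_cases h3 : (m / p) % 10 > d
        · rw [if_pos h3]; linarith
        · rw [if_neg h3]
          by_cases h4 : (m / p) % 10 = d
          · rw [if_pos h4]; linarith
          · rw [if_neg h4, haeq]

theorem cdLoop_add (n d : Int) : ∀ (f : Nat) (p t : Int),
    cdLoop f n d p t = t + cdLoop f n d p 0 := by
  intro f
  induction f with
  | zero => intro p t; simp [cdLoop]
  | succ f ih =>
    intro p t
    rw [cdLoop_step, cdLoop_step]
    split_ifs with h
    · rw [ih (p * 10) (t + pvT n d p), ih (p * 10) (0 + pvT n d p)]
      ring
    · ring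

theorem cdLoop_nonneg (n d : Int) (hn : 0 ≤ n) : ∀ (f : Nat) (p : Int), 0 < p →
    0 ≤ cdLoop f n d p 0 := by
  intro f
  induction f with
  | zero => intro p _; simp [cdLoop]
  | succ f ih =>
    intro p hp
    rw [cdLoop_step]
    split_ifs with h
    · rw [cdLoop_add n d f (p * 10) (0 + pvT n d p)]
      have h1 := pvT_nonneg n d p hp hn
      have h2 := ih (p * 10) (by omega)
      linarith
    · exact le_refl 0

theorem cdLoop_mono (n m d : Int) (hn : 0 ≤ n) (hnm : n ≤ m) : ∀ (f : Nat) (p : Int), 0 < p →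
    cdLoop f n d p 0 ≤ cdLoop f m d p 0 := by
  intro f
  induction f with
  | zero => intro p _; simp [cdLoop]
  | succ f ih =>
    intro p hp
    rw [cdLoop_step, cdLoop_step]
    by_cases h1 : p ≤ n
    · rw [if_pos h1, if_pos (by omega : p ≤ m), cdLoop_add n d f (p * 10) (0 + pvT n d p),
        cdLoop_add m d f (p * 10) (0 + pvT m d p)]
      have h2 := pvT_mono n m d p hp hnm
      have h3 := ih (p * 10) (by omega)
      linarith
    · rw [if_neg h1]
      by_cases h2 : p ≤ m
      · rw [if_pos h2, cdLoop_add m d f (p * 10) (0 + pvT m d p)]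
        have h3 := pvT_nonneg m d p hp (by omega)
        have h4 := cdLoop_nonneg m d (by omega) f (p * 10) (by omega)
        linarith
      · rw [if_neg h2]

theorem count_digit_mono (d n m : Int) (hnm : n ≤ m) : count_digit n d ≤ count_digit m d := by
  unfold count_digit
  split_ifs with h1 h2
  · exact le_refl 0
  · exact cdLoop_nonneg m d (by omega) 64 1 one_pos
  · omega
  · exact cdLoop_mono n m d (by omega) hnm 64 1 one_pos

-- pruning soundness: a pruned interval contains no fixed point
theorem pvPrune (d lo hi x : Int)
    (hpr : count_digit hi d < lo ∨ count_digit lo d > hi)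
    (h1 : lo ≤ x) (h2 : x ≤ hi) : count_digit x d ≠ x := by
  rcases hpr with h | h
  · have := count_digit_mono d x hi h2; omega
  · have := count_digit_mono d lo x h1; omega

-- ============ B's bisection returns the fixed points of [lo, hi], ascending ============

theorem goB_step (f : Nat) (d lo hi : Int) (out : List Int) :
    goB (f + 1) d lo hi out =
      if count_digit hi d < lo ∨ count_digit lo d > hi then out
      else if lo = hi then (if count_digit lo d = lo then out ++ [lo] else out)
      else goB f d (PySem.Int.floordiv (lo + hi) 2 + 1) hi
        (goB f d lo (PySem.Int.floordiv (lo + hi) 2) out) := rfl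

theorem goB_spec (d : Int) : ∀ (f : Nat) (lo hi : Int), lo ≤ hi → hi - lo + 1 ≤ 2 ^ f →
    ∃ r : List Int, (∀ out, goB (f + 1) d lo hi out = out ++ r) ∧ r.Pairwise (· < ·) ∧
      ∀ x, x ∈ r ↔ lo ≤ x ∧ x ≤ hi ∧ count_digit x d = x := by
  intro f
  induction f with
  | zero =>
    intro lo hi hlh hw
    have heq : lo = hi := by norm_num at hw; omega
    subst heq
    by_cases hpr : count_digit lo d < lo ∨ count_digit lo d > lo
    · refine ⟨[], fun out => by rw [goB_step, if_pos hpr]; simp, by simp, fun x => ?_⟩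
      simp only [List.not_mem_nil, false_iff]
      rintro ⟨h1, h2, h3⟩
      exact pvPrune d lo lo x hpr h1 h2 h3
    · by_cases hfix : count_digit lo d = lo
      · refine ⟨[lo], fun out => by rw [goB_step, if_neg hpr, if_pos rfl, if_pos hfix],
          List.pairwise_singleton _ _, fun x => ?_⟩
        simp only [List.mem_singleton]
        constructor
        · rintro rfl; exact ⟨le_refl _, le_refl _, hfix⟩
        · rintro ⟨h1, h2, _⟩; omega
      · refine ⟨[], fun out => by rw [goB_step, if_neg hpr, if_pos rfl, if_neg hfix]; simp, by simp, fun x => ?_⟩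
        simp only [List.not_mem_nil, false_iff]
        rintro ⟨h1, h2, h3⟩
        have : x = lo := by omega
        exact hfix (this ▸ h3)
  | succ f ih =>
    intro lo hi hlh hw
    by_cases hpr : count_digit hi d < lo ∨ count_digit lo d > hi
    · refine ⟨[], fun out => by rw [goB_step, if_pos hpr]; simp, by simp, fun x => ?_⟩
      simp only [List.not_mem_nil, false_iff]
      rintro ⟨h1, h2, h3⟩
      exact pvPrune d lo hi x hpr h1 h2 h3
    · by_cases heq : lo = hi
      · subst heq
        by_cases hfix : count_digit lo d = lo
        · refine ⟨[lo], fun out => by rw [goB_step, if_neg hpr, if_pos rfl, if_pos hfix],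
          List.pairwise_singleton _ _, fun x => ?_⟩
          simp only [List.mem_singleton]
          constructor
          · rintro rfl; exact ⟨le_refl _, le_refl _, hfix⟩
          · rintro ⟨h1, h2, _⟩; omega
        · refine ⟨[], fun out => by rw [goB_step, if_neg hpr, if_pos rfl, if_neg hfix]; simp, by simp, fun x => ?_⟩
          simp only [List.not_mem_nil, false_iff]
          rintro ⟨h1, h2, h3⟩
          have : x = lo := by omega
          exact hfix (this ▸ h3)
      · have hlt : lo < hi := lt_of_le_of_ne hlh heq
        have hmid : PySem.Int.floordiv (lo + hi) 2 = (lo + hi) / 2 :=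
          PySem.Int.floordiv_eq_ediv_of_pos (by norm_num)
        have hpow : (2:Int) ^ (f + 1) = 2 * 2 ^ f := by ring
        have hml : lo ≤ PySem.Int.floordiv (lo + hi) 2 := by rw [hmid]; omega
        have hmr : PySem.Int.floordiv (lo + hi) 2 < hi := by rw [hmid]; omega
        obtain ⟨r1, he1, hp1, hm1⟩ := ih lo (PySem.Int.floordiv (lo + hi) 2) hml
          (by rw [hmid]; omega)
        obtain ⟨r2, he2, hp2, hm2⟩ := ih (PySem.Int.floordiv (lo + hi) 2 + 1) hi (by omega)
          (by rw [hmid]; omega)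
        refine ⟨r1 ++ r2, ?_, ?_, ?_⟩
        · intro out
          rw [goB_step, if_neg hpr, if_neg heq, he1, he2, List.append_assoc]
        · refine List.pairwise_append.2 ⟨hp1, hp2, fun a ha b hb => ?_⟩
          have h1 := (hm1 a).1 ha
          have h2 := (hm2 b).1 hb
          omega
        · intro x
          rw [List.mem_append, hm1, hm2]
          constructor
          · rintro (⟨h1, h2, h3⟩ | ⟨h1, h2, h3⟩) <;> exact ⟨by omega, by omega, h3⟩
          · rintro ⟨h1, h2, h3⟩
            by_cases hx : x ≤ PySem.Int.floordiv (lo + hi) 2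
            · exact Or.inl ⟨h1, hx, h3⟩
            · exact Or.inr ⟨by omega, h2, h3⟩

-- ============ A's stack loop returns the fixed points, descending ============

-- `range(a, b, s)` for positive step, as a cons.
theorem pvRange_nil {a b s : Int} (hs : 0 < s) (hba : b ≤ a) :
    PySem.List.pyRange a b s = [] := by
  rw [PySem.List.pyRange_of_pos _ _ hs, if_neg (by omega)]
  simp

theorem pvRange_cons {a b s : Int} (hs : 0 < s) (hab : a < b) :
    PySem.List.pyRange a b s = a :: PySem.List.pyRange (a + s) b s := by
  rw [PySem.List.pyRange_of_pos _ _ hs, PySem.List.pyRange_of_pos _ _ hs]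
  by_cases h2 : a + s < b
  · rw [if_pos hab, if_pos h2]
    have e1 : b - (a + s) + s - 1 = b - a - 1 := by ring
    have e2 : b - a + s - 1 = (b - a - 1) + 1 * s := by ring
    have hstep : (b - a + s - 1) / s = (b - a - 1) / s + 1 := by
      rw [e2, Int.add_mul_ediv_right _ _ (by omega : s ≠ 0)]
    have hq0 : 0 ≤ (b - a - 1) / s := Int.ediv_nonneg (by omega) (by omega)
    have hN : ((b - a + s - 1) / s).toNat = ((b - a - 1) / s).toNat + 1 := by omega
    rw [e1, hN, List.range_succ_eq_map, List.map_cons, List.map_map]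
    have hf0 : a + s * ((0 : Nat) : Int) = a := by simp
    rw [hf0]
    congr 1
    apply List.map_congr_left
    intro k _
    simp only [Function.comp_apply, Nat.succ_eq_add_one]
    push_cast
    ring
  · rw [if_pos hab, if_neg h2]
    have h1 : 1 ≤ (b - a + s - 1) / s := by
      rw [Int.le_ediv_iff_mul_le hs]; omega
    have h2' : (b - a + s - 1) / s < 2 := by
      rw [Int.ediv_lt_iff_lt_mul hs]; omega
    have hN : ((b - a + s - 1) / s).toNat = 1 := by omega
    rw [hN]
    simp

-- the step is ≥ 1, and ≤ the width when the width is ≥ 1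
theorem pvStep_pos {lo hi : Int} (h : lo ≤ hi) :
    0 < PySem.Int.floordiv (hi - lo + 10) 10 := by
  have := (PySem.Int.le_floordiv_iff_mul_le (a := hi - lo + 10) (q := 1) (by norm_num : (0:Int) < 10)).2 (by omega)
  omega

theorem pvStep_le {lo hi : Int} (h : lo < hi) :
    PySem.Int.floordiv (hi - lo + 10) 10 ≤ hi - lo := by
  have := (PySem.Int.floordiv_lt_iff_lt_mul (a := hi - lo + 10) (q := hi - lo + 1) (by norm_num : (0:Int) < 10)).2 (by omega)
  omega

-- facts about a child subrange
theorem pvChild_facts {lo hi s st : Int} (hs : 0 < s)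
    (hm : st ∈ PySem.List.pyRange lo (hi + 1) s) :
    lo ≤ st ∧ st ≤ hi ∧ st ≤ min hi (st + s - 1) ∧ min hi (st + s - 1) ≤ hi ∧
      min hi (st + s - 1) - st ≤ s - 1 := by
  rcases (PySem.List.mem_pyRange_iff_of_pos hs st).1 hm with ⟨h1, h2, -⟩
  omega

-- every point of [lo, hi] lies in a child subrange
theorem pvCover (s : Int) (hs : 0 < s) :
    ∀ (n : Nat) (lo hi : Int), lo ≤ hi → (hi - lo).toNat = n →
    ∀ x, lo ≤ x → x ≤ hi →
      ∃ st ∈ PySem.List.pyRange lo (hi + 1) s, st ≤ x ∧ x ≤ st + s - 1 := by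
  intro n
  induction n using Nat.strong_induction_on with
  | _ n ih =>
    intro lo hi hlh hn x hx1 hx2
    rw [pvRange_cons hs (by omega)]
    by_cases hx : x ≤ lo + s - 1
    · exact ⟨lo, List.mem_cons_self, hx1, hx⟩
    · have hls : lo + s ≤ hi := by omega
      obtain ⟨st, hst, h1, h2⟩ := ih ((hi - (lo + s)).toNat) (by omega) (lo + s) hi (by omega) rfl x (by omega) hx2
      exact ⟨st, List.mem_cons_of_mem _ hst, h1, h2⟩

-- the starts of the children are s apart
theorem pvRange_gap {lo b s : Int} (hs : 0 < s) :
    (PySem.List.pyRange lo b s).Pairwise (fun a c => a + s ≤ c) := by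
  rw [PySem.List.pyRange_of_pos _ _ hs]
  split_ifs
  · rw [List.pairwise_map]
    apply List.pairwise_lt_range.imp_of_mem
    intro k1 k2 _ _ hk
    have hk' : (k1 : Int) + 1 ≤ (k2 : Int) := by exact_mod_cast hk
    have := Int.mul_le_mul_of_nonneg_left hk' hs.le
    ring_nf at this ⊢
    omega
  · simp

-- fuel weight of a stack: one pop per unit
def pvM (stack : List (Int × Int)) : Nat :=
  (stack.map (fun p => 2 * (p.2 - p.1).toNat + 1)).sum

-- the children of a frame weigh (2*(w+1) - number of children)
theorem pvM_children (s : Int) (hs : 0 < s) :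
    ∀ (n : Nat) (lo hi : Int), lo ≤ hi → (hi - lo).toNat = n →
    pvM ((PySem.List.pyRange lo (hi + 1) s).map (fun st => (st, min hi (st + s - 1)))) +
        (PySem.List.pyRange lo (hi + 1) s).length
      = 2 * ((hi - lo).toNat + 1) := by
  intro n
  induction n using Nat.strong_induction_on with
  | _ n ih =>
    intro lo hi hlh hn
    rw [pvRange_cons hs (by omega)]
    by_cases h2 : s ≤ hi - lo
    · have hrec := ih ((hi - (lo + s)).toNat) (by omega) (lo + s) hi (by omega) rfl
      simp only [pvM, List.map_cons, List.sum_cons, List.length_cons] at hrec ⊢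
      omega
    · rw [pvRange_nil hs (by omega)]
      simp only [pvM, List.map_cons, List.map_nil, List.sum_cons, List.sum_nil,
        List.length_cons, List.length_nil]
      omega

theorem pvChildren_len {lo hi s : Int} (hs : 0 < s) (hle : s ≤ hi - lo) :
    2 ≤ (PySem.List.pyRange lo (hi + 1) s).length := by
  rw [pvRange_cons hs (by omega), pvRange_cons hs (by omega)]
  simp

-- A's loop: pops the stack (head-first = descending disjoint intervals) and emits
-- exactly the fixed points of the stacked intervals, in descending order.
set_option maxRecDepth 8000 in
theorem pvLoopA_spec (d : Int) :
    ∀ (fuel : Nat) (stack : List (Int × Int)),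
      stack.Pairwise (fun p q => q.2 < p.1) → (∀ p ∈ stack, p.1 ≤ p.2) → pvM stack ≤ fuel →
      ∃ r : List Int, (∀ ans, loopA fuel d stack ans = ans ++ r) ∧ r.Pairwise (· > ·) ∧
        ∀ x, x ∈ r ↔ ∃ p ∈ stack, p.1 ≤ x ∧ x ≤ p.2 ∧ count_digit x d = x := by
  intro fuel
  induction fuel with
  | zero =>
    intro stack hord hbd hm
    match stack with
    | [] => exact ⟨[], fun ans => by simp [loopA], by simp, fun x => by simp⟩
    | (lo, hi) :: rest => simp [pvM] at hm
  | succ fuel ih =>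
    intro stack hord hbd hm
    match stack with
    | [] => exact ⟨[], fun ans => by simp [loopA], by simp, fun x => by simp⟩
    | (lo, hi) :: rest =>
      have hlh : lo ≤ hi := hbd (lo, hi) List.mem_cons_self
      have hordr : ∀ q ∈ rest, q.2 < lo := fun q hq => (List.pairwise_cons.1 hord).1 q hq
      have hord' : rest.Pairwise (fun p q => q.2 < p.1) := (List.pairwise_cons.1 hord).2
      have hbd' : ∀ p ∈ rest, p.1 ≤ p.2 := fun p hp => hbd p (List.mem_cons_of_mem _ hp)
      have hm' : pvM ((lo, hi) :: rest) = 2 * (hi - lo).toNat + 1 + pvM rest := by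
        simp only [pvM, List.map_cons, List.sum_cons]
      by_cases hpr : count_digit hi d < lo ∨ count_digit lo d > hi
      · obtain ⟨r, he, hpw, hmem⟩ := ih rest hord' hbd' (by omega)
        refine ⟨r, fun ans => ?_, hpw, fun x => ?_⟩
        · simp only [loopA]; rw [if_pos hpr]; exact he ans
        · rw [hmem]
          constructor
          · rintro ⟨p, hp, h⟩; exact ⟨p, List.mem_cons_of_mem _ hp, h⟩
          · rintro ⟨p, hp, h1, h2, h3⟩
            rcases List.mem_cons.1 hp with rfl | hp'
            · exact absurd h3 (pvPrune d lo hi x hpr h1 h2)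
            · exact ⟨p, hp', h1, h2, h3⟩
      · by_cases heq : lo = hi
        · subst heq
          obtain ⟨r, he, hpw, hmem⟩ := ih rest hord' hbd' (by omega)
          by_cases hfix : count_digit lo d = lo
          · refine ⟨lo :: r, fun ans => ?_, ?_, fun x => ?_⟩
            · simp only [loopA]
              rw [if_neg hpr]
              simp only [ite_true]
              rw [if_pos hfix, he (ans ++ [lo]), List.append_assoc, List.singleton_append]
            · refine List.pairwise_cons.2 ⟨fun y hy => ?_, hpw⟩
              obtain ⟨q, hq, _, hy2, _⟩ := (hmem y).1 hy
              have := hordr q hq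
              omega
            · rw [List.mem_cons, hmem]
              constructor
              · rintro (h | ⟨p, hp, h⟩)
                · exact ⟨(lo, lo), List.mem_cons_self, le_of_eq h.symm, le_of_eq h, h ▸ hfix⟩
                · exact ⟨p, List.mem_cons_of_mem _ hp, h⟩
              · rintro ⟨p, hp, h1, h2, h3⟩
                rcases List.mem_cons.1 hp with rfl | hp'
                · left; omega
                · exact Or.inr ⟨p, hp', h1, h2, h3⟩
          · refine ⟨r, fun ans => ?_, hpw, fun x => ?_⟩
            · simp only [loopA]
              rw [if_neg hpr]
              simp only [ite_true]
              rw [if_neg hfix]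
              exact he ans
            · rw [hmem]
              constructor
              · rintro ⟨p, hp, h⟩; exact ⟨p, List.mem_cons_of_mem _ hp, h⟩
              · rintro ⟨p, hp, h1, h2, h3⟩
                rcases List.mem_cons.1 hp with rfl | hp'
                · have : x = lo := by omega
                  exact absurd (this ▸ h3) hfix
                · exact ⟨p, hp', h1, h2, h3⟩
        · have hlt : lo < hi := lt_of_le_of_ne hlh heq
          have hs : 0 < PySem.Int.floordiv (hi - lo + 10) 10 := pvStep_pos hlh
          have hsle : PySem.Int.floordiv (hi - lo + 10) 10 ≤ hi - lo := pvStep_le hlt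
          set s := PySem.Int.floordiv (hi - lo + 10) 10 with hsdef
          set starts := PySem.List.pyRange lo (hi + 1) s with hstdef
          set children := starts.map (fun st => (st, min hi (st + s - 1))) with hchdef
          have hchild : ∀ st ∈ starts, lo ≤ st ∧ st ≤ hi ∧ st ≤ min hi (st + s - 1) ∧
              min hi (st + s - 1) ≤ hi ∧ min hi (st + s - 1) - st ≤ s - 1 :=
            fun st hst => pvChild_facts hs hst
          -- invariant for the new stack
          have hordn : (children.reverse ++ rest).Pairwise (fun p q => q.2 < p.1) := by
            refine List.pairwise_append.2 ⟨?_, hord', ?_⟩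
            · rw [List.pairwise_reverse, hchdef, List.pairwise_map]
              exact (pvRange_gap hs).imp (fun h => by simp only []; omega)
            · intro p hp q hq
              rw [List.mem_reverse, hchdef, List.mem_map] at hp
              obtain ⟨st, hst, rfl⟩ := hp
              have h1 := (hchild st hst).1
              have h2 := hordr q hq
              simp only []
              omega
          have hbdn : ∀ p ∈ children.reverse ++ rest, p.1 ≤ p.2 := by
            intro p hp
            rcases List.mem_append.1 hp with hp | hp
            · rw [List.mem_reverse, hchdef, List.mem_map] at hp
              obtain ⟨st, hst, rfl⟩ := hp
              exact (hchild st hst).2.2.1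
            · exact hbd' p hp
          -- fuel accounting
          have hmc := pvM_children s hs ((hi - lo).toNat) lo hi hlh rfl
          rw [← hstdef, ← hchdef] at hmc
          have hlen : 2 ≤ starts.length := pvChildren_len hs hsle
          have hmrev : pvM (children.reverse ++ rest) = pvM children + pvM rest := by
            simp only [pvM, List.map_append, List.sum_append, List.map_reverse, List.sum_reverse]
          have hlenc : starts.length = children.length := by simp [hchdef]
          have hmn : pvM (children.reverse ++ rest) ≤ fuel := by
            rw [hmrev]; rw [hm'] at hm; omega
          obtain ⟨r, he, hpw, hmem⟩ := ih (children.reverse ++ rest) hordn hbdn hmn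
          refine ⟨r, fun ans => ?_, hpw, fun x => ?_⟩
          · simp only [loopA]
            rw [if_neg hpr, if_neg heq]
            exact he ans
          · rw [hmem]
            constructor
            · rintro ⟨p, hp, h1, h2, h3⟩
              rcases List.mem_append.1 hp with hp | hp
              · rw [List.mem_reverse, hchdef, List.mem_map] at hp
                obtain ⟨st, hst, rfl⟩ := hp
                have hf := hchild st hst
                exact ⟨(lo, hi), List.mem_cons_self, by simp only [] at h1 h2 ⊢; omega,
                  by simp only [] at h1 h2 ⊢; omega, h3⟩
              · exact ⟨p, List.mem_cons_of_mem _ hp, h1, h2, h3⟩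
            · rintro ⟨p, hp, h1, h2, h3⟩
              rcases List.mem_cons.1 hp with rfl | hp'
              · simp only [] at h1 h2
                obtain ⟨st, hst, hc1, hc2⟩ :=
                  pvCover s hs ((hi - lo).toNat) lo hi hlh rfl x h1 h2
                refine ⟨(st, min hi (st + s - 1)), ?_, by simp only []; omega,
                  by simp only []; omega, h3⟩
                rw [List.mem_append, List.mem_reverse, hchdef, List.mem_map]
                exact Or.inl ⟨st, hst, rfl⟩
              · exact ⟨p, List.mem_append.2 (Or.inr hp'), h1, h2, h3⟩

-- ===== VERDICT (by name: the statement is the Claim_ definition above) =====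
theorem roots_spec : Claim_equal_roots := by
  intro d _
  show roots d = roots_alt d
  have hfuel : pvM [((0:Int), (1000000000000:Int))] ≤ 3000000000000 := by
    simp only [pvM, List.map_cons, List.map_nil, List.sum_cons, List.sum_nil]
    have : Int.toNat 1000000000000 = 1000000000000 := rfl
    omega
  obtain ⟨rA, heA, hpA, hmA⟩ := pvLoopA_spec d 3000000000000 [(0, 1000000000000)]
    (List.pairwise_singleton _ _)
    (by intro p hp; rw [List.mem_singleton] at hp; subst hp; norm_num) hfuel
  obtain ⟨rB, heB, hpB, hmB⟩ := goB_spec d 40 0 1000000000000 (by norm_num) (by norm_num)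
  unfold roots roots_alt
  rw [heA [], heB [], List.nil_append, List.nil_append]
  have hpBr : rB.reverse.Pairwise (· > ·) := List.pairwise_reverse.2 hpB
  have hmem : ∀ x, x ∈ rA ↔ x ∈ rB.reverse := by
    intro x
    rw [List.mem_reverse, hmA, hmB]
    constructor
    · rintro ⟨p, hp, h⟩
      rw [List.mem_singleton] at hp
      subst hp
      exact h
    · intro h
      exact ⟨(0, 1000000000000), List.mem_singleton.2 rfl, h⟩
  have hperm : rA.Perm rB.reverse := (List.perm_ext_iff_of_nodup hpA.nodup hpBr.nodup).2 hmem
  have h1 : PySem.List.sorted rB.reverse (fun x => x) true = rA :=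
    PySem.List.sorted_rev_eq_of_perm_of_pairwise_gt _ _ (fun x => x) hperm hpA
  have h2 : PySem.List.sorted rB.reverse (fun x => x) true = rB.reverse :=
    PySem.List.sorted_rev_eq_of_perm_of_pairwise_gt _ _ (fun x => x) (List.Perm.refl _) hpBr
  rw [← h1, h2]
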